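-- pv_equiv track=rewrite | github.com/Broda/adventOfCode | 2016/day02.py | getPart2
-- ===== SOURCE A (Python) =====
-- def getKeyCoord(keypad : tuple, key : int) -> tuple:
--     for y in range(len(keypad)):
--         for x in range(len(keypad[0])):
--             if keypad[y][x] == key: return (x, y)
--
-- def getKeyAtPos(keypad : tuple, pos : list) -> int:
--     return keypad[pos[1]][pos[0]]
--
-- def addTupleToList(A : list, T : tuple) -> list:
--     return [A[0] + T[0], A[1] + T[1]]
--
-- def posOutOfBounds(keypad : tuple, pos : list) -> bool:
--     if pos[0] < 0 or pos[0] >= len(keypad[0]) or pos[1] < 0 or pos[1] >= len(keypad):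
--         return True
--     key = getKeyAtPos(keypad, pos)
--     if key == 0: return True
--     return False
--
-- def getNextKey(keypad : tuple, currKey : int, path : str) -> int:
--     directions = {"U":(0,-1), "D":(0,1), "L":(-1,0), "R":(1,0)}
--     currPos = getKeyCoord(keypad, currKey)
--     for step in list(path):
--         dir = directions[step]
--         tempPos = addTupleToList(currPos, dir)
--         if not posOutOfBounds(keypad, tempPos):
--             currPos = tempPos
--     return getKeyAtPos(keypad, currPos)
--
-- def getPart2(input : list) -> str:
--     keypad = ((0, 0, 1, 0, 0), (0, 2, 3, 4, 0), (5, 6, 7, 8, 9), (0, 10, 11, 12, 0), (0, 0, 13, 0, 0))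
--     currKey = 5
--     keys = ""
--
--     for line in input:
--         currKey = getNextKey(keypad, currKey, line)
--         letters = {10: "A", 11: "B", 12: "C", 13: "D"}
--         if currKey > 9:
--             keys += letters[currKey]
--         else:
--             keys += str(currKey)
--
--     return keys
-- ===== SOURCE B (Python) =====
-- # key -> direction -> next key; moves off the diamond (or onto a blank) stay put
-- TABLE = {
--     1:  {"U": 1,  "D": 3,  "L": 1,  "R": 1},
--     2:  {"U": 2,  "D": 6,  "L": 2,  "R": 3},
--     3:  {"U": 1,  "D": 7,  "L": 2,  "R": 4},
--     4:  {"U": 4,  "D": 8,  "L": 3,  "R": 4},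
--     5:  {"U": 5,  "D": 5,  "L": 5,  "R": 6},
--     6:  {"U": 2,  "D": 10, "L": 5,  "R": 7},
--     7:  {"U": 3,  "D": 11, "L": 6,  "R": 8},
--     8:  {"U": 4,  "D": 12, "L": 7,  "R": 9},
--     9:  {"U": 9,  "D": 9,  "L": 8,  "R": 9},
--     10: {"U": 6,  "D": 10, "L": 10, "R": 11},
--     11: {"U": 7,  "D": 13, "L": 10, "R": 12},
--     12: {"U": 8,  "D": 12, "L": 11, "R": 12},
--     13: {"U": 11, "D": 13, "L": 13, "R": 13},
-- }
--
-- def getPart2(input: list) -> str: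
--     key = 5
--     code = ""
--     for line in input:
--         for c in line:
--             key = TABLE[key][c]
--         code += "ABCD"[key - 10] if key > 9 else str(key)
--     return code
-- ===== Notes on version B (the rewrite author's own statement) =====
-- stated objective: simpler
-- what changed: Replaces per-character 2D coordinate simulation (linear search for the current key's coordinates, vector addition, bounds and blank-cell checks) with a precomputed key->direction->key transition table folded over each line.
import Mathlib
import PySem

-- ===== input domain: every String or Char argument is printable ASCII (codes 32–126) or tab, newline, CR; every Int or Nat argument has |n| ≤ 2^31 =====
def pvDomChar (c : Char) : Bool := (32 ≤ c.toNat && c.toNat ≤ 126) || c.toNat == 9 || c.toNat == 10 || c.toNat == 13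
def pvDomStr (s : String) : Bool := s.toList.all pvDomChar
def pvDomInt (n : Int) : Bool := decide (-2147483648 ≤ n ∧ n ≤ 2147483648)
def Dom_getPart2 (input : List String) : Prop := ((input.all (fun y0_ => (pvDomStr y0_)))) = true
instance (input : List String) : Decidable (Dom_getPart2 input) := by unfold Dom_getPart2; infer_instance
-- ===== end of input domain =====

-- B replaces A's coordinate simulation (linear search for the key, vector addition, bounds
-- and blank-cell checks) by a precomputed key→(direction→key) transition table folded over
-- each line; objective: simpler.

-- ===== PORT A =====
def pvKeypad : List (List Int) :=
  [[0,0,1,0,0],[0,2,3,4,0],[5,6,7,8,9],[0,10,11,12,0],[0,0,13,0,0]]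

-- nested for-loops with early return → Option-accumulating folds over the same ranges
def getKeyCoord (keypad : List (List Int)) (key : Int) : Option (Int × Int) :=
  (PySem.List.pyRange 0 (PySem.List.len keypad) 1).foldl (fun acc y =>
    match acc with
    | some p => some p
    | none =>
      (PySem.List.pyRange 0 (PySem.List.len (PySem.List.pyGetD keypad 0 [])) 1).foldl (fun acc2 x =>
        match acc2 with
        | some p => some p
        | none =>
          if (PySem.List.pyGet? keypad y).bind (fun row => PySem.List.pyGet? row x) = some key
          then some (x, y) else none) none) none

def getKeyAtPos (keypad : List (List Int)) (pos : Int × Int) : Option Int :=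
  (PySem.List.pyGet? keypad pos.2).bind (fun row => PySem.List.pyGet? row pos.1)

def addTupleToList (A : Int × Int) (T : Int × Int) : Int × Int := (A.1 + T.1, A.2 + T.2)

def posOutOfBounds (keypad : List (List Int)) (pos : Int × Int) : Bool :=
  if pos.1 < 0 || pos.1 ≥ PySem.List.len (PySem.List.pyGetD keypad 0 []) ||
     pos.2 < 0 || pos.2 ≥ PySem.List.len keypad then true
  else match getKeyAtPos keypad pos with
       | some 0 => true
       | _ => false   -- the `none` branch is unreachable: the bounds were just checked

def pvDirections : PySem.Dict Char (Int × Int) :=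
  PySem.Dict.ofList [('U',(0,-1)), ('D',(0,1)), ('L',(-1,0)), ('R',(1,0))]

-- the body of getNextKey's loop; `none` threads a KeyError from directions[step] (excluded by Pre_)
def stepA (keypad : List (List Int)) (acc : Option (Int × Int)) (step : Char) : Option (Int × Int) :=
  acc.bind fun currPos =>
    (pvDirections.get? step).map fun dir =>
      let tempPos := addTupleToList currPos dir
      if posOutOfBounds keypad tempPos then currPos else tempPos

def getNextKey (keypad : List (List Int)) (currKey : Int) (path : String) : Option Int :=
  (path.toList.foldl (stepA keypad) (getKeyCoord keypad currKey)).bind (getKeyAtPos keypad)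

def pvLetters : PySem.Dict Int String :=
  PySem.Dict.ofList [(10,"A"), (11,"B"), (12,"C"), (13,"D")]

def getPart2 (input : List String) : String :=
  (input.foldl (fun (st : Int × String) line =>
      let currKey := (getNextKey pvKeypad st.1 line).getD 0   -- none unreachable under Pre_
      let piece := if currKey > 9 then pvLetters.getD currKey "" else PySem.Int.toStr currKey
      (currKey, st.2 ++ piece)) ((5 : Int), "")).2

-- ===== PORT B =====
-- key -> direction -> next key; moves off the diamond (or onto a blank) stay put
def pvTable : PySem.Dict Int (PySem.Dict Char Int) :=
  PySem.Dict.ofList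
    [ (1,  PySem.Dict.ofList [('U',1),  ('D',3),  ('L',1),  ('R',1)]),
      (2,  PySem.Dict.ofList [('U',2),  ('D',6),  ('L',2),  ('R',3)]),
      (3,  PySem.Dict.ofList [('U',1),  ('D',7),  ('L',2),  ('R',4)]),
      (4,  PySem.Dict.ofList [('U',4),  ('D',8),  ('L',3),  ('R',4)]),
      (5,  PySem.Dict.ofList [('U',5),  ('D',5),  ('L',5),  ('R',6)]),
      (6,  PySem.Dict.ofList [('U',2),  ('D',10), ('L',5),  ('R',7)]),
      (7,  PySem.Dict.ofList [('U',3),  ('D',11), ('L',6),  ('R',8)]),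
      (8,  PySem.Dict.ofList [('U',4),  ('D',12), ('L',7),  ('R',9)]),
      (9,  PySem.Dict.ofList [('U',9),  ('D',9),  ('L',8),  ('R',9)]),
      (10, PySem.Dict.ofList [('U',6),  ('D',10), ('L',10), ('R',11)]),
      (11, PySem.Dict.ofList [('U',7),  ('D',13), ('L',10), ('R',12)]),
      (12, PySem.Dict.ofList [('U',8),  ('D',12), ('L',11), ('R',12)]),
      (13, PySem.Dict.ofList [('U',11), ('D',13), ('L',13), ('R',13)]) ]

-- TABLE[key][c]; `none` threads the KeyError Python raises on a character outside U/D/L/R (excluded by Pre_)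
def stepB (acc : Option Int) (c : Char) : Option Int :=
  acc.bind fun k => (pvTable.get? k).bind fun row => row.get? c

def getPart2_alt (input : List String) : String :=
  (input.foldl (fun (st : Int × String) line =>
      let key := (line.toList.foldl stepB (some st.1)).getD 0   -- none unreachable under Pre_
      -- "ABCD"[key-10]; the index is always in range (key ∈ 10..13 when key > 9)
      let piece := if key > 9 then String.ofList [(PySem.Str.pyGet? "ABCD" (key - 10)).getD ' '] else PySem.Int.toStr key
      (key, st.2 ++ piece)) ((5 : Int), "")).2

-- ===== PRECONDITION & SPEC =====
-- Pre_ excludes inputs containing a character other than U/D/L/R, on which A's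
-- `directions[step]` raises KeyError.
def Pre_getPart2 (input : List String) : Prop :=
  (input.all (fun line => line.toList.all (fun c => c == 'U' || c == 'D' || c == 'L' || c == 'R'))) = true
instance (input : List String) : Decidable (Pre_getPart2 input) := by unfold Pre_getPart2; infer_instance

def pvWitness_getPart2 : List String := ["UL", "DR"]

def Spec_getPart2 (input : List String) (out : String) : Prop := out = getPart2_alt input
instance (input : List String) (out : String) : Decidable (Spec_getPart2 input out) := by unfold Spec_getPart2; infer_instance

-- ===== CLAIM (what is proved, stated in full; the proofs are below) =====
def Claim_equal_getPart2 : Prop := ∀ (input : List String), Dom_getPart2 input → Pre_getPart2 input → Spec_getPart2 input (getPart2 input)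

-- ===== LEMMAS AND PROOFS =====

-- the 13 keys of the diamond keypad
def pvK13 : List Int := [1,2,3,4,5,6,7,8,9,10,11,12,13]

-- proof-only pure form of one table step (B's port itself threads Option)
def pvNextB (k : Int) (c : Char) : Int :=
  (((pvTable.get? k).bind fun row => row.get? c).getD 0)

-- one character of simulation agrees with one table lookup, and the key stays on the keypad
set_option maxRecDepth 40000 in
theorem pv_step_sim : ∀ k ∈ pvK13, ∀ c ∈ (['U','D','L','R'] : List Char),
    stepB (some k) c = some (pvNextB k c) ∧
    stepA pvKeypad (getKeyCoord pvKeypad k) c = getKeyCoord pvKeypad (pvNextB k c) ∧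
    pvNextB k c ∈ pvK13 := by
  intro k hk c hc
  fin_cases hk <;> fin_cases hc <;> exact ⟨by decide, by decide, by decide⟩

theorem pv_fold_sim : ∀ (cs : List Char), (∀ c ∈ cs, c ∈ (['U','D','L','R'] : List Char)) →
    ∀ k ∈ pvK13,
    cs.foldl (stepA pvKeypad) (getKeyCoord pvKeypad k) = getKeyCoord pvKeypad (cs.foldl pvNextB k) ∧
    cs.foldl stepB (some k) = some (cs.foldl pvNextB k) ∧
    cs.foldl pvNextB k ∈ pvK13 := by
  intro cs
  induction cs with
  | nil => intro _ k hk; exact ⟨rfl, rfl, hk⟩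
  | cons c cs ih =>
    intro hall k hk
    have hc := hall c (List.mem_cons_self ..)
    have hrest : ∀ c' ∈ cs, c' ∈ (['U','D','L','R'] : List Char) :=
      fun c' hc' => hall c' (List.mem_cons_of_mem _ hc')
    have hstep := pv_step_sim k hk c hc
    simp only [List.foldl_cons, hstep.1, hstep.2.1]
    exact ih hrest (pvNextB k c) hstep.2.2

set_option maxRecDepth 40000 in
theorem pv_atpos : ∀ k ∈ pvK13,
    (getKeyCoord pvKeypad k).bind (getKeyAtPos pvKeypad) = some k := by
  intro k hk
  fin_cases hk <;> decide

theorem pv_nextKey : ∀ k ∈ pvK13, ∀ (line : String),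
    (∀ c ∈ line.toList, c ∈ (['U','D','L','R'] : List Char)) →
    getNextKey pvKeypad k line = some (line.toList.foldl pvNextB k) ∧
    line.toList.foldl stepB (some k) = some (line.toList.foldl pvNextB k) ∧
    line.toList.foldl pvNextB k ∈ pvK13 := by
  intro k hk line hall
  have h := pv_fold_sim line.toList hall k hk
  refine ⟨?_, h.2.1, h.2.2⟩
  unfold getNextKey
  rw [h.1]
  exact pv_atpos _ h.2.2

set_option maxRecDepth 4000 in
theorem pv_render : ∀ k ∈ pvK13,
    (if k > 9 then pvLetters.getD k "" else PySem.Int.toStr k)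
    = (if k > 9 then String.ofList [(PySem.Str.pyGet? "ABCD" (k - 10)).getD ' '] else PySem.Int.toStr k) := by
  decide

theorem pv_outer : ∀ (lines : List String),
    (∀ line ∈ lines, ∀ c ∈ line.toList, c ∈ (['U','D','L','R'] : List Char)) →
    ∀ k ∈ pvK13, ∀ (s : String),
    lines.foldl (fun (st : Int × String) line =>
      let currKey := (getNextKey pvKeypad st.1 line).getD 0
      let piece := if currKey > 9 then pvLetters.getD currKey "" else PySem.Int.toStr currKey
      (currKey, st.2 ++ piece)) (k, s)
    = lines.foldl (fun (st : Int × String) line =>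
      let key := (line.toList.foldl stepB (some st.1)).getD 0
      let piece := if key > 9 then String.ofList [(PySem.Str.pyGet? "ABCD" (key - 10)).getD ' '] else PySem.Int.toStr key
      (key, st.2 ++ piece)) (k, s) := by
  intro lines
  induction lines with
  | nil => intro _ _ _ _; rfl
  | cons line rest ih =>
    intro hpre k hk s
    have hline : ∀ c ∈ line.toList, c ∈ (['U','D','L','R'] : List Char) :=
      hpre line (List.mem_cons_self ..)
    have hrest : ∀ l ∈ rest, ∀ c ∈ l.toList, c ∈ (['U','D','L','R'] : List Char) :=
      fun l hl => hpre l (List.mem_cons_of_mem _ hl)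
    have hnk := pv_nextKey k hk line hline
    simp only [List.foldl_cons, hnk.1, hnk.2.1, Option.getD_some, pv_render _ hnk.2.2]
    exact ih hrest _ hnk.2.2 _

theorem pv_main : ∀ (input : List String), Pre_getPart2 input → getPart2 input = getPart2_alt input := by
  intro input hpre
  have hpre' : ∀ line ∈ input, ∀ c ∈ line.toList, c ∈ (['U','D','L','R'] : List Char) := by
    unfold Pre_getPart2 at hpre
    rw [List.all_eq_true] at hpre
    intro line hl c hc
    have := hpre line hl
    rw [List.all_eq_true] at this
    have h := this c hc
    simp only [Bool.or_eq_true, beq_iff_eq] at h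
    simp only [List.mem_cons, List.not_mem_nil, or_false]
    tauto
  unfold getPart2 getPart2_alt
  rw [pv_outer input hpre' 5 (by decide) ""]

-- ===== VERDICT (by name: the statement is the Claim_ definition above) =====
theorem getPart2_spec : Claim_equal_getPart2 := by
  intro input _ hpre
  unfold Spec_getPart2
  exact pv_main input hpre
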